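-- pv_equiv track=rewrite | github.com/tonyqug/HAII | 03_learning_service/learning_service/generation.py | _select_records_for_questions
-- ===== SOURCE A (Python) =====
-- from typing import Any, Dict, Iterable, List, Optional, Sequence, Tuple
--
-- def _select_records_for_questions(
--
--     lecture_records: Sequence[Dict[str, Any]],
--     question_count: int,
--     coverage_mode: str,
--     topic_text: str = "",
-- ) -> List[Dict[str, Any]]:
--     if not lecture_records:
--         return []
--     ordered = list(lecture_records)
--     if topic_text:
--         ordered.sort(
--             key=lambda record: (
--                 -int(record.get("_topic_score", 0)),
--                 int(record.get("slide_number") or 0),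
--                 record.get("concept_name", ""),
--             )
--         )
--     if coverage_mode == "balanced":
--         selected: List[Dict[str, Any]] = []
--         while len(selected) < question_count:
--             for record in ordered:
--                 selected.append(record)
--                 if len(selected) >= question_count:
--                     break
--         return selected
--     if coverage_mode in {"high_coverage", "exhaustive"}:
--         selected = list(ordered[:question_count])
--         if len(selected) < question_count:
--             idx = 0
--             while len(selected) < question_count:
--                 selected.append(ordered[idx % len(ordered)])
--                 idx += 1
--         return selected
--     return list(ordered[:question_count])
-- ===== SOURCE B (Python) =====
-- def _select_records_for_questions(
--     lecture_records,
--     question_count,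
--     coverage_mode,
--     topic_text="",
-- ):
--     if not lecture_records:
--         return []
--     ordered = list(lecture_records)
--     if topic_text:
--         ordered.sort(
--             key=lambda record: (
--                 -int(record.get("_topic_score", 0)),
--                 int(record.get("slide_number") or 0),
--                 record.get("concept_name", ""),
--             )
--         )
--     if coverage_mode in ("balanced", "high_coverage", "exhaustive"):
--         if question_count <= 0:
--             return []
--         q, r = divmod(question_count, len(ordered))
--         return ordered * q + ordered[:r]
--     return list(ordered[:question_count])
-- ===== Notes on version B (the rewrite author's own statement) =====
-- stated objective: simpler
-- what changed: The two repetition branches of A (the 'balanced' nested while/for append loop and the 'high_coverage'/'exhaustive' prefix-plus-index-modulo while loop) both produce a cyclic repetition of the ordered records, so B collapses them into one loop-free closed form q, r = divmod(question_count, len(ordered)); ordered * q + ordered[:r], guarded by question_count <= 0.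
-- intended difference: For coverage_mode 'high_coverage'/'exhaustive' with negative question_count and more records than |question_count|, A returns ordered[:question_count] (all but the last |question_count| records, a negative-slice artefact), while B returns [], the intended result of a request for no questions. — e.g. on _select_records_for_questions([[("k", "v")], [("k", "w")]], -1, "high_coverage", ""): A returns [[("k", "v")]], B returns []
import Mathlib
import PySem

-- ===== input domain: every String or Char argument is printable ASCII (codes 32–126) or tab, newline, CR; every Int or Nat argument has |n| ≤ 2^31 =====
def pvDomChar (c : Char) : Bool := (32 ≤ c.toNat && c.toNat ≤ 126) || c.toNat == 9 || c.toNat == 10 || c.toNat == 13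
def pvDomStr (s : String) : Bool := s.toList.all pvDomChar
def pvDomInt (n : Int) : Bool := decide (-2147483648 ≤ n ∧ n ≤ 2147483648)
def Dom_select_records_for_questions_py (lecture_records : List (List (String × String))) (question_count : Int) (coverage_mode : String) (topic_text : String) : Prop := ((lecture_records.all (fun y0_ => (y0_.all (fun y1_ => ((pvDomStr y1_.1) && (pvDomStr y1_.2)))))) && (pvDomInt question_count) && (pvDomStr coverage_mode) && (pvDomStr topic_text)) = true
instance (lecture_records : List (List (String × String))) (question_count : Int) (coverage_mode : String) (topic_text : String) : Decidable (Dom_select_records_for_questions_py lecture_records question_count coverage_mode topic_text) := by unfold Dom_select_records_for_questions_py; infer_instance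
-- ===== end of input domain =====

-- B collapses A's two repetition loops (balanced while/for, high_coverage prefix + index-modulo
-- while) into one divmod closed form ordered*q ++ ordered[:r] guarded by question_count ≤ 0;
-- B intentionally returns [] (instead of a negative slice of the records) for negative
-- question_count in the 'high_coverage'/'exhaustive' modes — see D_ below.

-- ===== PORT A =====
-- shared field/key helpers: both Pythons compute the identical sort key
-- record.get("_topic_score", 0) then int(...)  (on Pre_, the parse succeeds; .getD 0 is a totality default)
def pvTs (rec : List (String × String)) : Int :=
  match List.lookup "_topic_score" rec with
  | some s => (PySem.Int.ofStr? s).getD 0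
  | none => 0
-- int(record.get("slide_number") or 0): absent or "" (falsy) gives 0
def pvSlide (rec : List (String × String)) : Int :=
  match List.lookup "slide_number" rec with
  | some s => if s = "" then 0 else (PySem.Int.ofStr? s).getD 0
  | none => 0
def pvConcept (rec : List (String × String)) : String :=
  (List.lookup "concept_name" rec).getD ""
-- Python's tuple '<' on the key (-ts, slide, concept), lexicographic; string '<' is code-point order
def pvKeyLt (a b : List (String × String)) : Bool :=
  if (-pvTs a) ≠ (-pvTs b) then decide ((-pvTs a) < (-pvTs b))
  else if pvSlide a ≠ pvSlide b then decide (pvSlide a < pvSlide b)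
  else PySem.Chars.strLt (pvConcept a).toList (pvConcept b).toList

-- inner 'for record in ordered: selected.append(record); if len(selected) >= question_count: break'
def pvAInner (qc : Int) : List (List (String × String)) → List (List (String × String)) → List (List (String × String))
  | [], sel => sel
  | r :: rest, sel =>
      let sel' := sel ++ [r]
      if qc ≤ (sel'.length : Int) then sel' else pvAInner qc rest sel'

theorem pvAInner_length_lt (qc : Int) (l : List (List (String × String)))
    (hl : l ≠ []) (sel : List (List (String × String))) :
    sel.length < (pvAInner qc l sel).length := by
  induction l generalizing sel with
  | nil => exact absurd rfl hl
  | cons r rest ih =>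
      simp only [pvAInner]
      split
      · simp
      · rcases rest with _ | ⟨r2, rest2⟩
        · simp [pvAInner]
        · exact Nat.lt_of_le_of_lt (by simp) (ih (by simp) (sel ++ [r]))

-- outer 'while len(selected) < question_count:' of the balanced branch
-- (the isEmpty guard is a totality guard only: A returns before it with empty records)
def pvAOuter (qc : Int) (ordered : List (List (String × String))) (sel : List (List (String × String))) : List (List (String × String)) :=
  if _h : (sel.length : Int) < qc then
    if ho : ordered.isEmpty then sel
    else pvAOuter qc ordered (pvAInner qc ordered sel)
  else sel
termination_by (qc - sel.length).toNat
decreasing_by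
  have := pvAInner_length_lt qc ordered (by simpa using ho) sel
  omega

-- 'while len(selected) < question_count: selected.append(ordered[idx % len(ordered)]); idx += 1'
-- (isEmpty guard and '.getD []' are totality defaults; unreachable where A returns)
def pvAFill (qc : Int) (ordered : List (List (String × String))) (idx : Int) (sel : List (List (String × String))) : List (List (String × String)) :=
  if (sel.length : Int) < qc then
    if ordered.isEmpty then sel
    else pvAFill qc ordered (idx + 1)
      (sel ++ [(PySem.List.pyGet? ordered (PySem.Int.mod idx (ordered.length : Int))).getD []])
  else sel
termination_by (qc - sel.length).toNat
decreasing_by simp; omega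

def select_records_for_questions_py (lecture_records : List (List (String × String))) (question_count : Int) (coverage_mode : String) (topic_text : String) : List (List (String × String)) :=
  if lecture_records = [] then []
  else
    let ordered :=
      if topic_text = "" then lecture_records
      else lecture_records.foldl (fun acc r => PySem.List.insertBy pvKeyLt r acc) []
    if coverage_mode = "balanced" then pvAOuter question_count ordered []
    else if coverage_mode = "high_coverage" ∨ coverage_mode = "exhaustive" then
      let selected := PySem.List.slice ordered none (some question_count)
      if (selected.length : Int) < question_count then pvAFill question_count ordered 0 selected
      else selected
    else PySem.List.slice ordered none (some question_count)

-- ===== PORT B =====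
def select_records_for_questions_py_alt (lecture_records : List (List (String × String))) (question_count : Int) (coverage_mode : String) (topic_text : String) : List (List (String × String)) :=
  if lecture_records = [] then []
  else
    let ordered :=
      if topic_text = "" then lecture_records
      else lecture_records.foldl (fun acc r => PySem.List.insertBy pvKeyLt r acc) []
    if coverage_mode = "balanced" ∨ coverage_mode = "high_coverage" ∨ coverage_mode = "exhaustive" then
      if question_count ≤ 0 then []
      else
        -- q, r = divmod(question_count, len(ordered)); ordered is nonempty here
        let q := PySem.Int.floordiv question_count (ordered.length : Int)
        let r := PySem.Int.mod question_count (ordered.length : Int)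
        PySem.List.pyRepeat ordered q ++ PySem.List.slice ordered none (some r)
    else PySem.List.slice ordered none (some question_count)

-- ===== PRECONDITION & SPEC =====
-- a record's int fields parse wherever Python's sort key would evaluate int(...) on them
def pvParseOk (rec : List (String × String)) : Bool :=
  (match List.lookup "_topic_score" rec with
   | some s => (PySem.Int.ofStr? s).isSome
   | none => true) &&
  (match List.lookup "slide_number" rec with
   | some s => s = "" || (PySem.Int.ofStr? s).isSome
   | none => true)
-- Pre_ excludes exactly the inputs where A raises ValueError: a non-empty topic_text triggers the
-- sort, whose key calls int() on the "_topic_score" / truthy "slide_number" strings of every record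
def Pre_select_records_for_questions_py (lecture_records : List (List (String × String))) (question_count : Int) (coverage_mode : String) (topic_text : String) : Prop :=
  topic_text = "" ∨ lecture_records.all pvParseOk = true
instance (lecture_records : List (List (String × String))) (question_count : Int) (coverage_mode : String) (topic_text : String) : Decidable (Pre_select_records_for_questions_py lecture_records question_count coverage_mode topic_text) := by unfold Pre_select_records_for_questions_py; infer_instance

def pvWitness_select_records_for_questions_py : (List (List (String × String))) × Int × String × String :=
  ([[("concept_name", "a")]], 1, "balanced", "")

-- For 'high_coverage'/'exhaustive' with negative question_count and more records than
-- |question_count|, A returns ordered[:question_count] (all but the last |question_count| records,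
-- a negative-slice artefact), while B returns [], the intended result of a request for no questions.
def D_select_records_for_questions_py (lecture_records : List (List (String × String))) (question_count : Int) (coverage_mode : String) (topic_text : String) : Prop :=
  lecture_records ≠ [] ∧ (coverage_mode = "high_coverage" ∨ coverage_mode = "exhaustive") ∧
    question_count < 0 ∧ -question_count < (lecture_records.length : Int)
instance (lecture_records : List (List (String × String))) (question_count : Int) (coverage_mode : String) (topic_text : String) : Decidable (D_select_records_for_questions_py lecture_records question_count coverage_mode topic_text) := by unfold D_select_records_for_questions_py; infer_instance

def Spec_select_records_for_questions_py (lecture_records : List (List (String × String))) (question_count : Int) (coverage_mode : String) (topic_text : String) (out : List (List (String × String))) : Prop := ¬ D_select_records_for_questions_py lecture_records question_count coverage_mode topic_text → out = select_records_for_questions_py_alt lecture_records question_count coverage_mode topic_text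
instance (lecture_records : List (List (String × String))) (question_count : Int) (coverage_mode : String) (topic_text : String) (out : List (List (String × String))) : Decidable (Spec_select_records_for_questions_py lecture_records question_count coverage_mode topic_text out) := by unfold Spec_select_records_for_questions_py; infer_instance

def pvDiffWitness_select_records_for_questions_py : (List (List (String × String))) × Int × String × String :=
  ([[("k", "v")], [("k", "w")]], -1, "high_coverage", "")
def pvDiffWitnessOut_select_records_for_questions_py : (List (List (String × String))) × (List (List (String × String))) :=
  ([[("k", "v")]], [])

-- ===== CLAIM (what is proved, stated in full; the proofs are below) =====
def Claim_unchanged_select_records_for_questions_py : Prop := ∀ (lecture_records : List (List (String × String))) (question_count : Int) (coverage_mode : String) (topic_text : String), Dom_select_records_for_questions_py lecture_records question_count coverage_mode topic_text → Pre_select_records_for_questions_py lecture_records question_count coverage_mode topic_text → Spec_select_records_for_questions_py lecture_records question_count coverage_mode topic_text (select_records_for_questions_py lecture_records question_count coverage_mode topic_text)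
def Claim_changed_select_records_for_questions_py : Prop := Dom_select_records_for_questions_py (pvDiffWitness_select_records_for_questions_py.1) (pvDiffWitness_select_records_for_questions_py.2.1) (pvDiffWitness_select_records_for_questions_py.2.2.1) (pvDiffWitness_select_records_for_questions_py.2.2.2) ∧ Pre_select_records_for_questions_py (pvDiffWitness_select_records_for_questions_py.1) (pvDiffWitness_select_records_for_questions_py.2.1) (pvDiffWitness_select_records_for_questions_py.2.2.1) (pvDiffWitness_select_records_for_questions_py.2.2.2) ∧ D_select_records_for_questions_py (pvDiffWitness_select_records_for_questions_py.1) (pvDiffWitness_select_records_for_questions_py.2.1) (pvDiffWitness_select_records_for_questions_py.2.2.1) (pvDiffWitness_select_records_for_questions_py.2.2.2) ∧ select_records_for_questions_py (pvDiffWitness_select_records_for_questions_py.1) (pvDiffWitness_select_records_for_questions_py.2.1) (pvDiffWitness_select_records_for_questions_py.2.2.1) (pvDiffWitness_select_records_for_questions_py.2.2.2) = pvDiffWitnessOut_select_records_for_questions_py.1 ∧ select_records_for_questions_py_alt (pvDiffWitness_select_records_for_questions_py.1) (pvDiffWitness_select_records_for_questions_py.2.1) (pvDiffWitness_select_records_for_questions_py.2.2.1)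 (pvDiffWitness_select_records_for_questions_py.2.2.2) = pvDiffWitnessOut_select_records_for_questions_py.2 ∧ pvDiffWitnessOut_select_records_for_questions_py.1 ≠ pvDiffWitnessOut_select_records_for_questions_py.2
def Claim_exact_select_records_for_questions_py : Prop := ∀ (lecture_records : List (List (String × String))) (question_count : Int) (coverage_mode : String) (topic_text : String), Dom_select_records_for_questions_py lecture_records question_count coverage_mode topic_text → Pre_select_records_for_questions_py lecture_records question_count coverage_mode topic_text → D_select_records_for_questions_py lecture_records question_count coverage_mode topic_text → select_records_for_questions_py lecture_records question_count coverage_mode topic_text ≠ select_records_for_questions_py_alt lecture_records question_count coverage_mode topic_text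

-- ===== LEMMAS AND PROOFS =====

-- the cyclic prefix of length k of ordered repeated: B's closed form as a Nat function
def pvRep (ordered : List (List (String × String))) (k : Nat) : List (List (String × String)) :=
  (List.replicate (k / ordered.length) ordered).flatten ++ ordered.take (k % ordered.length)

theorem length_insertBy_pv (b : List (String × String) → List (String × String) → Bool)
    (x : List (String × String)) (ys : List (List (String × String))) :
    (PySem.List.insertBy b x ys).length = ys.length + 1 := by
  induction ys with
  | nil => simp [PySem.List.insertBy]
  | cons y t ih => simp [PySem.List.insertBy]; split <;> simp [ih]

theorem pvSorted_length (lr : List (List (String × String))) :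
    ∀ acc, (lr.foldl (fun acc r => PySem.List.insertBy pvKeyLt r acc) acc).length
      = lr.length + acc.length := by
  induction lr with
  | nil => simp
  | cons r t ih => intro acc; simp [List.foldl_cons, ih, length_insertBy_pv]; omega

theorem pvRep_zero (ordered : List (List (String × String))) : pvRep ordered 0 = [] := by
  simp [pvRep]

theorem pvRep_of_le (ordered : List (List (String × String))) (k : Nat)
    (hn : ordered ≠ []) (hk : k ≤ ordered.length) : pvRep ordered k = ordered.take k := by
  rcases Nat.lt_or_eq_of_le hk with h | h
  · simp [pvRep, Nat.div_eq_of_lt h, Nat.mod_eq_of_lt h]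
  · subst h
    simp [pvRep, Nat.div_self (List.length_pos_of_ne_nil hn)]

theorem pvRep_add_length (ordered : List (List (String × String))) (k : Nat)
    (hn : ordered ≠ []) (hk : ordered.length ≤ k) :
    pvRep ordered k = ordered ++ pvRep ordered (k - ordered.length) := by
  have hn0 : 0 < ordered.length := List.length_pos_of_ne_nil hn
  obtain ⟨m, rfl⟩ : ∃ m, k = m + ordered.length := ⟨k - ordered.length, by omega⟩
  simp [pvRep, Nat.add_div_right _ hn0, Nat.add_mod_right, List.replicate_succ]

theorem pvRep_succ (ordered : List (List (String × String))) (hn : ordered ≠ []) (k : Nat) :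
    pvRep ordered (k + 1) = pvRep ordered k ++ [ordered.getD (k % ordered.length) []] := by
  have hn0 : 0 < ordered.length := List.length_pos_of_ne_nil hn
  set n := ordered.length with hnn
  have hdm := Nat.div_add_mod k n
  have hdm' : k / n * n + k % n = k := by rw [Nat.mul_comm (k / n) n]; exact hdm
  have hmlt : k % n < n := Nat.mod_lt _ hn0
  by_cases h : k % n = n - 1
  · have hk1 : k + 1 = n * (k / n + 1) := by rw [Nat.mul_succ]; omega
    have hdiv : (k + 1) / n = k / n + 1 := by rw [hk1, Nat.mul_div_cancel_left _ hn0]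
    have hmod : (k + 1) % n = 0 := by rw [hk1, Nat.mul_mod_right]
    simp only [pvRep, ← hnn, hdiv, hmod, List.take_zero, List.append_nil, List.replicate_succ',
      List.flatten_append, List.flatten_cons, List.flatten_nil, List.append_nil]
    rw [List.append_assoc]
    congr 1
    rw [h]
    have hget : ordered.getD (n - 1) [] = ordered[n - 1]'(by omega) :=
      List.getD_eq_getElem _ _ (by omega)
    rw [hget]
    have htc := List.take_concat_get (l := ordered) (i := n - 1) (by omega)
    rw [List.concat_eq_append] at htc
    rw [htc, Nat.sub_add_cancel hn0]
    exact (List.take_of_length_le (le_of_eq hnn.symm)).symm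
  · have hdiv : (k + 1) / n = k / n := by
      apply Nat.div_eq_of_lt_le
      · have : k / n * n ≤ k := Nat.div_mul_le_self k n
        omega
      · rw [Nat.succ_mul]
        omega
    have hdm1 := Nat.div_add_mod (k + 1) n
    rw [hdiv] at hdm1
    have hmod : (k + 1) % n = k % n + 1 := by omega
    simp only [pvRep, ← hnn, hdiv, hmod]
    rw [List.append_assoc]
    congr 1
    rw [List.getD_eq_getElem _ _ hmlt]
    have htc := List.take_concat_get (l := ordered) (i := k % n) hmlt
    rw [List.concat_eq_append] at htc
    exact htc.symm

theorem pvRep_eq_map (ordered : List (List (String × String))) (hn : ordered ≠ []) (k : Nat) :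
    pvRep ordered k = (List.range k).map (fun j => ordered.getD (j % ordered.length) []) := by
  induction k with
  | zero => simp [pvRep]
  | succ k ih =>
      rw [pvRep_succ ordered hn k, List.range_succ, List.map_append, ← ih]
      simp

theorem pvAInner_eq (qc : Int) (l : List (List (String × String))) :
    ∀ sel, (sel.length : Int) < qc →
      pvAInner qc l sel = sel ++ l.take (qc - sel.length).toNat := by
  induction l with
  | nil => intro sel _; simp [pvAInner]
  | cons r rest ih =>
      intro sel h
      simp only [pvAInner]
      obtain ⟨m, hm⟩ : ∃ m, (qc - sel.length).toNat = m + 1 := ⟨(qc - sel.length).toNat - 1, by omega⟩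
      split
      · have : m = 0 := by rename_i hle; simp at hle; omega
        simp [hm, this]
      · rename_i hgt
        have h' : ((sel ++ [r]).length : Int) < qc := by simp at hgt ⊢; omega
        rw [ih _ h']
        have h2 : (qc - ((sel ++ [r]).length : Int)).toNat = m := by simp; omega
        rw [h2, hm, List.take_succ_cons]
        simp

theorem pvAOuter_eq (qc : Int) (ordered : List (List (String × String))) (hn : ordered ≠ []) :
    ∀ k sel, (qc - sel.length).toNat = k →
      pvAOuter qc ordered sel = sel ++ pvRep ordered k := by
  have hn0 : 0 < ordered.length := List.length_pos_of_ne_nil hn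
  intro k
  induction k using Nat.strong_induction_on with
  | _ k ih =>
      intro sel hk
      rw [pvAOuter]
      split
      · rename_i hlt
        have hkpos : 0 < k := by omega
        rw [dif_neg (by simpa using hn)]
        rw [pvAInner_eq qc ordered sel hlt, hk]
        have hlen : (ordered.take k).length = min k ordered.length := by simp
        by_cases hcase : k ≤ ordered.length
        · have hmin : min k ordered.length = k := by omega
          rw [ih 0 (by omega) _ (by simp [hmin]; omega)]
          rw [pvRep_zero, List.append_nil, pvRep_of_le ordered k hn hcase]
        · have hmin : min k ordered.length = ordered.length := by omega
          rw [List.take_of_length_le (by omega)]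
          rw [ih (k - ordered.length) (by omega) _ (by simp; omega)]
          rw [pvRep_add_length ordered k hn (by omega), List.append_assoc]
      · rename_i hge
        have : k = 0 := by omega
        simp [this, pvRep_zero]

theorem pvAFill_eq (qc : Int) (ordered : List (List (String × String))) (hn : ordered ≠ []) :
    ∀ k idx sel, 0 ≤ idx → (qc - sel.length).toNat = k →
      pvAFill qc ordered idx sel
        = sel ++ (List.range k).map (fun j => ordered.getD ((idx.toNat + j) % ordered.length) []) := by
  have hn0 : 0 < ordered.length := List.length_pos_of_ne_nil hn
  intro k
  induction k with
  | zero =>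
      intro idx sel _ hk
      rw [pvAFill, if_neg (by omega)]
      simp
  | succ k ih =>
      intro idx sel hidx hk
      rw [pvAFill, if_pos (by omega), if_neg (by simpa using hn)]
      have hmod : PySem.Int.mod idx (ordered.length : Int) = ((idx.toNat % ordered.length : Nat) : Int) := by
        have h0 : idx = ((idx.toNat : Nat) : Int) := by omega
        rw [h0, PySem.Int.mod_natCast]
        simp
      have hget : (PySem.List.pyGet? ordered (PySem.Int.mod idx (ordered.length : Int))).getD []
          = ordered.getD (idx.toNat % ordered.length) [] := by
        rw [hmod, PySem.List.pyGet?_natCast]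
        rw [List.getD_eq_getElem?_getD]
      rw [hget]
      rw [ih (idx + 1) _ (by omega) (by simp; omega)]
      have hidx1 : (idx + 1).toNat = idx.toNat + 1 := by omega
      rw [List.append_assoc]
      congr 1
      rw [List.range_succ_eq_map, List.map_cons, List.map_map]
      simp only [Nat.add_zero, List.singleton_append, hidx1]
      congr 1
      apply List.map_congr_left
      intro j _
      have harg : idx.toNat + (j + 1) = idx.toNat + 1 + j := by omega
      simp [Function.comp, harg]

-- B's repetition branch as pvRep
theorem pvAlt_rep (ordered : List (List (String × String))) (hn : ordered ≠ []) (qc : Int)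
    (hqc : 0 < qc) :
    PySem.List.pyRepeat ordered (PySem.Int.floordiv qc (ordered.length : Int)) ++
      PySem.List.slice ordered none (some (PySem.Int.mod qc (ordered.length : Int)))
      = pvRep ordered qc.toNat := by
  have hn0 : 0 < ordered.length := List.length_pos_of_ne_nil hn
  obtain ⟨k, rfl⟩ : ∃ k : Nat, qc = (k : Int) := ⟨qc.toNat, by omega⟩
  rw [PySem.Int.floordiv_natCast, PySem.Int.mod_natCast]
  rw [PySem.List.slice_to _ (by positivity)]
  simp only [pvRep, Int.toNat_natCast]
  congr 1
  all_goals simp [PySem.List.pyRepeat]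

-- the two ports agree for any nonempty ordered list, outside the D_ corner
theorem pv_branch_eq (ordered : List (List (String × String))) (hn : ordered ≠ [])
    (qc : Int) (cm : String)
    (hD : ¬((cm = "high_coverage" ∨ cm = "exhaustive") ∧ qc < 0 ∧ -qc < (ordered.length : Int))) :
    (if cm = "balanced" then pvAOuter qc ordered []
     else if cm = "high_coverage" ∨ cm = "exhaustive" then
       let selected := PySem.List.slice ordered none (some qc)
       if (selected.length : Int) < qc then pvAFill qc ordered 0 selected else selected
     else PySem.List.slice ordered none (some qc))
    = (if cm = "balanced" ∨ cm = "high_coverage" ∨ cm = "exhaustive" then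
         if qc ≤ 0 then []
         else
           PySem.List.pyRepeat ordered (PySem.Int.floordiv qc (ordered.length : Int)) ++
             PySem.List.slice ordered none (some (PySem.Int.mod qc (ordered.length : Int)))
       else PySem.List.slice ordered none (some qc)) := by
  have hn0 : 0 < ordered.length := List.length_pos_of_ne_nil hn
  by_cases hb : cm = "balanced"
  · rw [if_pos hb, if_pos (Or.inl hb)]
    by_cases hqc : qc ≤ 0
    · rw [if_pos hqc]
      rw [pvAOuter_eq qc ordered hn 0 [] (by simp; omega)]
      simp [pvRep_zero]
    · rw [if_neg hqc]
      rw [pvAOuter_eq qc ordered hn qc.toNat [] (by simp)]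
      rw [pvAlt_rep ordered hn qc (by omega)]
      simp
  · rw [if_neg hb]
    by_cases hh : cm = "high_coverage" ∨ cm = "exhaustive"
    · rw [if_pos hh, if_pos (Or.inr hh)]
      by_cases hqc : qc ≤ 0
      · rw [if_pos hqc]
        -- here ¬D forces the slice to be empty: length ≤ -qc, or qc = 0
        have hcl : (ordered.length : Int) ≤ -qc ∨ qc = 0 := by
          rcases lt_or_ge qc 0 with h | h
          · left; by_contra hc; exact hD ⟨hh, h, by omega⟩
          · right; omega
        have hslice : PySem.List.slice ordered none (some qc) = [] := by
          rcases hcl with h | h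
          · obtain ⟨m, hm, hq⟩ : ∃ m : Nat, 0 < m ∧ qc = -(m : Int) :=
              ⟨(-qc).toNat, by omega, by omega⟩
            rw [hq, PySem.List.slice_to_neg_natCast _ _ hm]
            have : ordered.length - m = 0 := by omega
            simp [this]
          · rw [h, PySem.List.slice_to _ le_rfl]; simp
        rw [hslice, if_neg (by simp; omega)]
      · rw [if_neg hqc]
        have hq0 : 0 ≤ qc := by omega
        have hslice : PySem.List.slice ordered none (some qc) = ordered.take qc.toNat :=
          PySem.List.slice_to _ hq0
        rw [hslice]
        have hlen : (ordered.take qc.toNat).length = min qc.toNat ordered.length := by simp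
        by_cases hcase : qc.toNat ≤ ordered.length
        · rw [if_neg (by simp [hlen]; omega)]
          rw [pvAlt_rep ordered hn qc (by omega), pvRep_of_le ordered qc.toNat hn hcase]
        · rw [if_pos (by simp [hlen]; omega)]
          rw [List.take_of_length_le (by omega)]
          rw [pvAFill_eq qc ordered hn (qc.toNat - ordered.length) 0 ordered (by omega) (by omega)]
          rw [pvAlt_rep ordered hn qc (by omega)]
          rw [pvRep_add_length ordered qc.toNat hn (by omega)]
          rw [pvRep_eq_map ordered hn]
          simp
    · rw [if_neg hh, if_neg (by tauto)]

-- ===== VERDICT (by name: the statement is the Claim_ definition above) =====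
theorem select_records_for_questions_py_spec : Claim_unchanged_select_records_for_questions_py := by
  intro lr qc cm tt _hdom _hpre hnD
  unfold select_records_for_questions_py select_records_for_questions_py_alt
  by_cases hlr : lr = []
  · simp [hlr]
  · rw [if_neg hlr, if_neg hlr]
    have hlen : (if tt = "" then lr
        else lr.foldl (fun acc r => PySem.List.insertBy pvKeyLt r acc) []).length = lr.length := by
      split
      · rfl
      · simpa using pvSorted_length lr []
    have hn : (if tt = "" then lr
        else lr.foldl (fun acc r => PySem.List.insertBy pvKeyLt r acc) []) ≠ [] := by
      intro hc
      apply hlr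
      have := hlen
      rw [hc] at this
      exact List.eq_nil_of_length_eq_zero this.symm
    apply pv_branch_eq _ hn qc cm
    intro ⟨h1, h2, h3⟩
    rw [hlen] at h3
    exact hnD ⟨hlr, h1, h2, h3⟩

theorem select_records_for_questions_py_changed : Claim_changed_select_records_for_questions_py := by
  unfold Claim_changed_select_records_for_questions_py; decide

theorem select_records_for_questions_py_tight : Claim_exact_select_records_for_questions_py := by
  intro lr qc cm tt _hdom _hpre hD
  obtain ⟨hlr, hcm, hqc, hlen⟩ := hD
  rw [select_records_for_questions_py, select_records_for_questions_py_alt]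
  rw [if_neg hlr, if_neg hlr]
  set ordered := (if tt = "" then lr
      else lr.foldl (fun acc r => PySem.List.insertBy pvKeyLt r acc) []) with hord
  have hlen' : ordered.length = lr.length := by
    rw [hord]; split
    · rfl
    · simpa using pvSorted_length lr []
  have hb : cm ≠ "balanced" := by rcases hcm with h | h <;> subst h <;> decide
  rw [if_neg hb, if_pos hcm, if_pos (Or.inr hcm)]
  obtain ⟨m, hm, hq⟩ : ∃ m : Nat, 0 < m ∧ qc = -(m : Int) := ⟨(-qc).toNat, by omega, by omega⟩
  rw [hq, PySem.List.slice_to_neg_natCast _ _ hm]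
  have htk : (ordered.take (ordered.length - m)).length = ordered.length - m := by simp
  rw [if_pos (show (-(m : Int)) ≤ 0 by omega)]
  rw [if_neg (show ¬(((ordered.take (ordered.length - m)).length : Int) < -(m : Int)) by
    rw [htk]; omega)]
  intro heq
  have hl := congrArg List.length heq
  rw [htk] at hl
  simp at hl
  omega
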